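-- pv_equiv track=rewrite | github.com/ChrisKoll/Goethe-Universitaet-iGEM2023 | projects/VbrK_promotor/Repeats_VbrR/kmer_prediciton.py | check_occs
-- ===== SOURCE A (Python) =====
-- def check_occs(occs:list):
--     duplicates = set()
--     for i in range(len(occs)-1):
--         for j in range(1, len(occs)):
--             if occs[i][1] > occs[j][0] > occs[i][0] or occs[j][1] > occs[i][0] > occs[j][0]:
--                 duplicates.add(i)
--                 duplicates.add(j)
--
--     dups_sorted = sorted(duplicates, reverse=True)
--     for i in dups_sorted:
--         occs.pop(i)
--
--     return occs
-- ===== SOURCE B (Python) =====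
-- def check_occs(occs: list):
--     # Sort indices by start, then one forward sweep (max end of strictly
--     # smaller starts) and one backward sweep (smallest strictly larger start)
--     # decide each interval's fate; returns a NEW list (A filters in place).
--     order = sorted(range(len(occs)), key=lambda k: occs[k][0])
--     removed = set()
--
--     best = None     # max end among intervals whose start < current start
--     run = None      # max end among all intervals processed so far
--     last_s = None
--     for k in order:
--         s, e = occs[k]
--         if last_s is not None and s > last_s:
--             best = run
--         last_s = s
--         if best is not None and best > s:
--             removed.add(k)
--         run = e if run is None else max(run, e)
--
--     succ = None     # smallest start strictly greater than current start
--     last_s = None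
--     for k in reversed(order):
--         s, e = occs[k]
--         if last_s is not None and s < last_s:
--             succ = last_s
--         last_s = s
--         if succ is not None and succ < e:
--             removed.add(k)
--
--     return [iv for k, iv in enumerate(occs) if k not in removed]
-- ===== Notes on version B (the rewrite author's own statement) =====
-- stated objective: faster
-- what changed: A's quadratic all-pairs overlap scan plus reverse-sorted in-place pops is replaced by sorting the indices by interval start and two linear sweeps (running max-end of strictly smaller starts forward, smallest strictly larger start backward) followed by one filtering pass.
import Mathlib
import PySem

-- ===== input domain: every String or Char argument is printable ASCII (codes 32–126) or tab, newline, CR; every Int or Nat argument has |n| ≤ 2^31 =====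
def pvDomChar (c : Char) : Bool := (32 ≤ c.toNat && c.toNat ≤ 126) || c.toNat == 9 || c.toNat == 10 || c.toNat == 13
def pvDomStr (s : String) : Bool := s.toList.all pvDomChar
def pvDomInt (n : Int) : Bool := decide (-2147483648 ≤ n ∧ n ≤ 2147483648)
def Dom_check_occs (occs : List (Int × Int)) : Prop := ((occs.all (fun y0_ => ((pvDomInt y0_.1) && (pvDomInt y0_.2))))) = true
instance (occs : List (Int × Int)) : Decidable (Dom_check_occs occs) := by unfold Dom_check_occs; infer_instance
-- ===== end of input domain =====

-- B replaces A's all-pairs overlap scan by a sort of the indices by start plus two linear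
-- sweeps (O(n log n) vs O(n^2)); equivalence is about the RETURN value only: Python A
-- filters the argument list in place, B returns a fresh list.

-- ===== PORT A =====
def check_occs (occs : List (Int × Int)) : List (Int × Int) :=
  -- every index fed to pyGetD/pop? below lies in range (ranges over the length),
  -- so the defaults are unreachable
  let dups : PySem.Set Int :=
    (PySem.List.pyRange 0 ((occs.length : Int) - 1) 1).foldl (fun d i =>
      (PySem.List.pyRange 1 (occs.length : Int) 1).foldl (fun d j =>
        let oi := PySem.List.pyGetD occs i (0, 0)
        let oj := PySem.List.pyGetD occs j (0, 0)
        if (oi.2 > oj.1 ∧ oj.1 > oi.1) ∨ (oj.2 > oi.1 ∧ oi.1 > oj.1) then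
          PySem.Set.add (PySem.Set.add d i) j
        else d) d) PySem.Set.empty
  let dups_sorted := PySem.List.sorted dups (fun x => x) true
  dups_sorted.foldl (fun l i => ((PySem.List.pop? l i).map (·.2)).getD l) occs

-- ===== PORT B =====
def pass1Step (occs : List (Int × Int)) :
    PySem.Set Int × Option Int × Option Int × Option Int → Int →
    PySem.Set Int × Option Int × Option Int × Option Int :=
  fun st k =>
    let (removed, best, run, last_s) := st
    let se := PySem.List.pyGetD occs k (0, 0)
    let best := match last_s with
      | some ls => if se.1 > ls then run else best
      | none => best
    let removed := match best with
      | some b => if b > se.1 then PySem.Set.add removed k else removed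
      | none => removed
    let run := match run with
      | some r => some (max r se.2)
      | none => some se.2
    (removed, best, run, some se.1)

def pass2Step (occs : List (Int × Int)) :
    PySem.Set Int × Option Int × Option Int → Int →
    PySem.Set Int × Option Int × Option Int :=
  fun st k =>
    let (removed, succ, last_s) := st
    let se := PySem.List.pyGetD occs k (0, 0)
    let succ := match last_s with
      | some ls => if se.1 < ls then some ls else succ
      | none => succ
    let removed := match succ with
      | some sc => if sc < se.2 then PySem.Set.add removed k else removed
      | none => removed
    (removed, succ, some se.1)

def check_occs_alt (occs : List (Int × Int)) : List (Int × Int) :=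
  let order := PySem.List.sorted (PySem.List.pyRange 0 (occs.length : Int) 1)
      (fun k => (PySem.List.pyGetD occs k (0, 0)).1) false
  let st1 := order.foldl (pass1Step occs) (PySem.Set.empty, none, none, none)
  let st2 := order.reverse.foldl (pass2Step occs) (st1.1, none, none)
  let removed := st2.1
  ((PySem.List.enumerate occs 0).filter
      (fun p => !PySem.Set.contains removed p.1)).map (·.2)

-- ===== PRECONDITION & SPEC =====
def Spec_check_occs (occs : List (Int × Int)) (out : List (Int × Int)) : Prop := out = check_occs_alt occs
instance (occs : List (Int × Int)) (out : List (Int × Int)) : Decidable (Spec_check_occs occs out) := by unfold Spec_check_occs; infer_instance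

-- ===== CLAIM (what is proved, stated in full; the proofs are below) =====
def Claim_equal_check_occs : Prop := ∀ (occs : List (Int × Int)), Dom_check_occs occs → Spec_check_occs occs (check_occs occs)

-- ===== LEMMAS AND PROOFS =====

/-- Start of the interval at (in-range) index `k`. -/
def sI (occs : List (Int × Int)) (k : Int) : Int := (PySem.List.pyGetD occs k (0, 0)).1
/-- End of the interval at (in-range) index `k`. -/
def eI (occs : List (Int × Int)) (k : Int) : Int := (PySem.List.pyGetD occs k (0, 0)).2

/-- A's pair condition at indices `k`, `j`. -/
def condB (occs : List (Int × Int)) (k j : Int) : Bool :=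
  decide ((eI occs k > sI occs j ∧ sI occs j > sI occs k) ∨
          (eI occs j > sI occs k ∧ sI occs k > sI occs j))

/-- Index `k` conflicts with some other interval. -/
def badB (occs : List (Int × Int)) (k : Int) : Bool :=
  (PySem.List.pyRange 0 (occs.length : Int) 1).any (fun j => condB occs k j)

/-- The common normal form: keep exactly the indices that conflict with nobody. -/
def G (occs : List (Int × Int)) : List (Int × Int) :=
  ((PySem.List.pyRange 0 (occs.length : Int) 1).filter (fun k => !badB occs k)).map
    (fun k => PySem.List.pyGetD occs k (0, 0))

lemma condB_symm (occs : List (Int × Int)) (k j : Int) : condB occs k j = condB occs j k := by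
  simp only [condB, decide_eq_decide]
  tauto

-- generic membership through a set-building fold
lemma mem_foldl_set {β : Type} (l : List β) (g : PySem.Set Int → β → PySem.Set Int)
    (Q : β → Int → Prop)
    (h : ∀ d b x, x ∈ g d b ↔ x ∈ d ∨ Q b x) :
    ∀ (d : PySem.Set Int) (x : Int), x ∈ l.foldl g d ↔ x ∈ d ∨ ∃ b ∈ l, Q b x := by
  induction l with
  | nil => simp
  | cons b l ih =>
    intro d x
    rw [List.foldl_cons, ih]
    rw [h]
    simp only [List.mem_cons]
    constructor
    · rintro ((hx | hq) | ⟨b', hb', hq⟩)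
      · exact Or.inl hx
      · exact Or.inr ⟨b, Or.inl rfl, hq⟩
      · exact Or.inr ⟨b', Or.inr hb', hq⟩
    · rintro (hx | ⟨b', (rfl | hb'), hq⟩)
      · exact Or.inl (Or.inl hx)
      · exact Or.inl (Or.inr hq)
      · exact Or.inr ⟨b', hb', hq⟩

lemma foldl_set_nodup {β : Type} (l : List β) (g : PySem.Set Int → β → PySem.Set Int)
    (h : ∀ d b, (d : List Int).Nodup → (g d b : List Int).Nodup) :
    ∀ d : PySem.Set Int, (d : List Int).Nodup → (l.foldl g d : List Int).Nodup := by
  induction l with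
  | nil => simp
  | cons b l ih => intro d hd; exact ih _ (h _ _ hd)

lemma mem_dups_iff (occs : List (Int × Int)) (x : Int) :
    x ∈ ((PySem.List.pyRange 0 ((occs.length : Int) - 1) 1).foldl (fun d i =>
      (PySem.List.pyRange 1 (occs.length : Int) 1).foldl (fun d j =>
        let oi := PySem.List.pyGetD occs i (0, 0)
        let oj := PySem.List.pyGetD occs j (0, 0)
        if (oi.2 > oj.1 ∧ oj.1 > oi.1) ∨ (oj.2 > oi.1 ∧ oi.1 > oj.1) then
          PySem.Set.add (PySem.Set.add d i) j
        else d) d) PySem.Set.empty) ↔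
    (0 ≤ x ∧ x < (occs.length : Int)) ∧ badB occs x = true := by
  rw [mem_foldl_set _ _ (fun i x => ∃ j ∈ PySem.List.pyRange 1 (occs.length : Int) 1,
        condB occs i j = true ∧ (x = i ∨ x = j)) ?hstep]
  case hstep =>
    intro d i x'
    apply mem_foldl_set
    intro d' j x''
    dsimp only
    split
    · rename_i hc
      simp only [PySem.Set.mem_add, condB, decide_eq_true_eq, sI, eI]
      tauto
    · rename_i hc
      simp only [condB, decide_eq_true_eq, sI, eI]
      tauto
  have hempty : ∀ y : Int, y ∈ (PySem.Set.empty : PySem.Set Int) ↔ False := by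
    intro y; simp [PySem.Set.empty]
  rw [hempty]
  simp only [false_or, badB, List.any_eq_true]
  constructor
  · rintro ⟨i, hi, j, hj, hc, hx⟩
    rw [PySem.List.mem_pyRange_one] at hi hj
    rcases hx with rfl | rfl
    · exact ⟨⟨hi.1, by omega⟩, j, by rw [PySem.List.mem_pyRange_one]; omega, hc⟩
    · exact ⟨⟨by omega, hj.2⟩, i, by rw [PySem.List.mem_pyRange_one]; omega,
        (condB_symm occs i x) ▸ hc⟩
  · rintro ⟨⟨hx0, hx1⟩, j, hj, hc⟩
    rw [PySem.List.mem_pyRange_one] at hj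
    have hne : x ≠ j := by
      intro h; subst h
      simp only [condB, decide_eq_true_eq] at hc
      omega
    rcases lt_or_gt_of_ne hne with h | h
    · exact ⟨x, by rw [PySem.List.mem_pyRange_one]; omega,
        j, by rw [PySem.List.mem_pyRange_one]; omega, hc, Or.inl rfl⟩
    · exact ⟨j, by rw [PySem.List.mem_pyRange_one]; omega,
        x, by rw [PySem.List.mem_pyRange_one]; omega,
        (condB_symm occs x j) ▸ hc, Or.inr rfl⟩

lemma dups_nodup (occs : List (Int × Int)) :
    ((PySem.List.pyRange 0 ((occs.length : Int) - 1) 1).foldl (fun d i =>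
      (PySem.List.pyRange 1 (occs.length : Int) 1).foldl (fun d j =>
        let oi := PySem.List.pyGetD occs i (0, 0)
        let oj := PySem.List.pyGetD occs j (0, 0)
        if (oi.2 > oj.1 ∧ oj.1 > oi.1) ∨ (oj.2 > oi.1 ∧ oi.1 > oj.1) then
          PySem.Set.add (PySem.Set.add d i) j
        else d) d) PySem.Set.empty : List Int).Nodup := by
  apply foldl_set_nodup
  · intro d i hd
    apply foldl_set_nodup
    · intro d' j hd'
      dsimp only
      split
      · exact PySem.Set.nodup_add _ _ (PySem.Set.nodup_add _ _ hd')
      · exact hd'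
    · exact hd
  · exact List.nodup_nil

lemma map_getD_range (xs : List (Int × Int)) :
    (List.range xs.length).map (fun k => xs.getD k (0, 0)) = xs := by
  apply List.ext_getElem
  · simp
  · intro i h1 h2
    simp [List.getD_eq_getElem?_getD, List.getElem?_eq_getElem h2]

lemma popFold (ds : List Int) : ∀ (xs : List (Int × Int)),
    ds.Pairwise (fun a b => b < a) → (∀ d ∈ ds, 0 ≤ d ∧ d < (xs.length : Int)) →
    ds.foldl (fun l i => ((PySem.List.pop? l i).map (·.2)).getD l) xs
      = ((List.range xs.length).filter (fun (k : Nat) => !decide ((k : Int) ∈ ds))).map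
          (fun k => xs.getD k (0, 0)) := by
  induction ds with
  | nil =>
    intro xs _ _
    simp only [List.foldl_nil, List.not_mem_nil, decide_false, Bool.not_false,
      List.filter_true]
    exact (map_getD_range xs).symm
  | cons a rest ih =>
    intro xs hpw hbnd
    obtain ⟨ha0, ha1⟩ := hbnd a List.mem_cons_self
    have hrest : ∀ d ∈ rest, d < a := (List.pairwise_cons.mp hpw).1
    set m := a.toNat with hmdef
    have hma : (m : Int) = a := Int.toNat_of_nonneg ha0
    have hm : m < xs.length := by omega
    have hpop : PySem.List.pop? xs a = some (xs[m], xs.eraseIdx m) := by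
      rw [← hma]; exact PySem.List.pop?_natCast xs m hm
    rw [List.foldl_cons]
    simp only [hpop, Option.map_some, Option.getD_some]
    rw [ih (xs.eraseIdx m) hpw.tail ?bnd]
    case bnd =>
      intro d hd
      have := (hbnd d (List.mem_cons_of_mem a hd)).1
      have := hrest d hd
      rw [List.length_eraseIdx]
      simp only [hm, if_pos]
      constructor <;> [omega; (push_cast; omega)]
    have hgetlt : ∀ k : Nat, k < m → (xs.eraseIdx m).getD k (0,0) = xs.getD k (0,0) := by
      intro k hk
      rw [List.getD_eq_getElem?_getD, List.getD_eq_getElem?_getD,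
        List.getElem?_eraseIdx_of_lt hk]
    have hgetge : ∀ k : Nat, m ≤ k → (xs.eraseIdx m).getD k (0,0) = xs.getD (k+1) (0,0) := by
      intro k hk
      rw [List.getD_eq_getElem?_getD, List.getD_eq_getElem?_getD,
        List.getElem?_eraseIdx_of_ge hk]
    have hlen : (xs.eraseIdx m).length = xs.length - 1 := by
      rw [List.length_eraseIdx]; simp [hm]
    set c := xs.length - m - 1 with hcdef
    have h1 : (xs.eraseIdx m).length = m + c := by omega
    have h2 : xs.length = (m + 1) + c := by omega
    rw [h1, h2, List.range_add, List.range_add, List.range_succ, List.append_assoc,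
      List.singleton_append]
    simp only [List.filter_append, List.map_append, List.filter_map, List.map_map]
    congr 1
    · -- indices below m
      have hfc : (List.range m).filter (fun k : Nat => !decide ((k:Int) ∈ rest))
          = (List.range m).filter (fun k : Nat => !decide ((k:Int) ∈ a :: rest)) := by
        apply List.filter_congr
        intro k hk
        rw [List.mem_range] at hk
        have : (k : Int) ≠ a := by omega
        simp [List.mem_cons, this]
      rw [hfc]
      apply List.map_congr_left
      intro k hk
      rw [List.mem_filter, List.mem_range] at hk
      exact hgetlt k hk.1
    · -- index m is dropped on the right, the tails coincide
      have hdropm : ((m :: List.map (fun x => m + 1 + x) (List.range c)).filter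
          (fun k : Nat => !decide ((k:Int) ∈ a :: rest)))
          = (List.map (fun x => m + 1 + x) (List.range c)).filter
              (fun k : Nat => !decide ((k:Int) ∈ a :: rest)) := by
        rw [List.filter_cons]
        have : (m : Int) ∈ a :: rest := by rw [hma]; exact List.mem_cons_self
        simp [this]
      rw [hdropm, List.filter_map, List.map_map]
      have hkeep1 : (List.range c).filter ((fun k : Nat => !decide ((k:Int) ∈ rest)) ∘
          (fun x => m + x)) = List.range c := by
        rw [List.filter_eq_self]
        intro t _
        have : ∀ d ∈ rest, d ≠ ((m + t : Nat) : Int) := by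
          intro d hd; have := hrest d hd; push_cast; omega
        simp only [Function.comp_apply, Bool.not_eq_eq_eq_not, Bool.not_true,
          decide_eq_false_iff_not]
        intro hmem
        exact this _ hmem rfl
      have hkeep2 : (List.range c).filter ((fun k : Nat => !decide ((k:Int) ∈ a :: rest)) ∘
          (fun x => m + 1 + x)) = List.range c := by
        rw [List.filter_eq_self]
        intro t _
        have hne : ((m + 1 + t : Nat) : Int) ≠ a := by push_cast; omega
        have : ∀ d ∈ rest, d ≠ ((m + 1 + t : Nat) : Int) := by
          intro d hd; have := hrest d hd; push_cast; omega
        simp only [Function.comp_apply, Bool.not_eq_eq_eq_not, Bool.not_true,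
          decide_eq_false_iff_not, List.mem_cons]
        rintro (h | hmem)
        · exact hne h
        · exact this _ hmem rfl
      rw [hkeep1, hkeep2]
      apply List.map_congr_left
      intro t _
      simp only [Function.comp_apply]
      rw [hgetge (m + t) (by omega)]
      congr 1
      omega

lemma check_occs_eq_G (occs : List (Int × Int)) : check_occs occs = G occs := by
  simp only [check_occs]
  set dups : PySem.Set Int :=
    (PySem.List.pyRange 0 ((occs.length : Int) - 1) 1).foldl (fun d i =>
      (PySem.List.pyRange 1 (occs.length : Int) 1).foldl (fun d j =>
        let oi := PySem.List.pyGetD occs i (0, 0)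
        let oj := PySem.List.pyGetD occs j (0, 0)
        if (oi.2 > oj.1 ∧ oj.1 > oi.1) ∨ (oj.2 > oi.1 ∧ oi.1 > oj.1) then
          PySem.Set.add (PySem.Set.add d i) j
        else d) d) PySem.Set.empty with hdupsdef
  set ds : List Int := PySem.List.sorted dups (fun x => x) true with hdsdef
  have hmem : ∀ x : Int, x ∈ ds ↔
      (0 ≤ x ∧ x < (occs.length : Int)) ∧ badB occs x = true := by
    intro x
    rw [hdsdef, PySem.List.mem_sorted, hdupsdef]
    exact mem_dups_iff occs x
  have hnd : ds.Nodup := by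
    rw [(PySem.List.sorted_perm dups (fun x : Int => x) true).nodup_iff]
    exact dups_nodup occs
  have hpw : ds.Pairwise (fun a b => b < a) := by
    have h1 : ds.Pairwise (fun a b : Int => b ≤ a) :=
      PySem.List.sorted_pairwise_rev dups (fun x : Int => x)
    exact (h1.and hnd).imp (by intro a b h; omega)
  have hbnd : ∀ d ∈ ds, 0 ≤ d ∧ d < (occs.length : Int) := by
    intro d hd
    exact ((hmem d).mp hd).1
  rw [popFold ds occs hpw hbnd]
  have hfc : (List.range occs.length).filter (fun k : Nat => !decide ((k : Int) ∈ ds))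
      = (List.range occs.length).filter (fun k : Nat => !badB occs (k : Int)) := by
    apply List.filter_congr
    intro k hk
    rw [List.mem_range] at hk
    congr 1
    rw [Bool.eq_iff_iff, decide_eq_true_eq, hmem]
    constructor
    · rintro ⟨_, hb⟩; exact hb
    · intro hb; exact ⟨⟨by omega, by omega⟩, hb⟩
  rw [hfc]
  unfold G
  rw [PySem.List.pyRange_zero_nat, List.filter_map, List.map_map]
  apply List.map_congr_left
  intro k _
  simp

/-- Invariant of B's forward sweep after having processed `P`. -/
def Inv1 (occs : List (Int × Int)) (P : List Int) (best run lastS : Option Int) : Prop :=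
  (P = [] → best = none ∧ run = none ∧ lastS = none) ∧
  (∀ lp, P.getLast? = some lp → lastS = some (sI occs lp) ∧
    (∀ j ∈ P, sI occs j ≤ sI occs lp) ∧
    (∀ c, (∃ m, run = some m ∧ c < m) ↔ ∃ j ∈ P, c < eI occs j) ∧
    (∀ c, (∃ m, best = some m ∧ c < m) ↔
      ∃ j ∈ P, sI occs j < sI occs lp ∧ c < eI occs j))

/-- Invariant of B's backward sweep after having processed `P`. -/
def Inv2 (occs : List (Int × Int)) (P : List Int) (succ lastS : Option Int) : Prop :=
  (P = [] → succ = none ∧ lastS = none) ∧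
  (∀ lp, P.getLast? = some lp → lastS = some (sI occs lp) ∧
    (∀ j ∈ P, sI occs lp ≤ sI occs j) ∧
    (∀ c, (∃ m, succ = some m ∧ m < c) ↔
      ∃ j ∈ P, sI occs lp < sI occs j ∧ sI occs j < c))

/-- `best`/`succ`-update of B's sweeps, named so proofs can case on them. -/
def upd1 (best run lastS : Option Int) (s : Int) : Option Int :=
  match lastS with
  | some ls => if s > ls then run else best
  | none => best

def updRem (removed : PySem.Set Int) (best : Option Int) (s k : Int) : PySem.Set Int :=
  match best with
  | some b => if b > s then PySem.Set.add removed k else removed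
  | none => removed

def updRun (run : Option Int) (e : Int) : Option Int :=
  match run with
  | some r => some (max r e)
  | none => some e

def upd2 (succ lastS : Option Int) (s : Int) : Option Int :=
  match lastS with
  | some ls => if s < ls then some ls else succ
  | none => succ

def updRem2 (removed : PySem.Set Int) (succ : Option Int) (e k : Int) : PySem.Set Int :=
  match succ with
  | some sc => if sc < e then PySem.Set.add removed k else removed
  | none => removed

lemma pass1Step_eq (occs : List (Int × Int)) (removed : PySem.Set Int)
    (best run lastS : Option Int) (k : Int) :
    pass1Step occs (removed, best, run, lastS) k
      = (updRem removed (upd1 best run lastS (sI occs k)) (sI occs k) k,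
         upd1 best run lastS (sI occs k), updRun run (eI occs k), some (sI occs k)) := rfl

lemma pass2Step_eq (occs : List (Int × Int)) (removed : PySem.Set Int)
    (succ lastS : Option Int) (k : Int) :
    pass2Step occs (removed, succ, lastS) k
      = (updRem2 removed (upd2 succ lastS (sI occs k)) (eI occs k) k,
         upd2 succ lastS (sI occs k), some (sI occs k)) := rfl

lemma pass1_go (occs : List (Int × Int)) : ∀ (q P : List Int)
    (removed : PySem.Set Int) (best run lastS : Option Int),
    (P ++ q).Pairwise (fun a b => sI occs a ≤ sI occs b) →
    Inv1 occs P best run lastS →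
    ∀ x, x ∈ (q.foldl (pass1Step occs) (removed, best, run, lastS)).1 ↔
      x ∈ removed ∨ ∃ k ∈ q, x = k ∧
        ∃ j ∈ P ++ q, sI occs j < sI occs k ∧ sI occs k < eI occs j := by
  intro q
  induction q with
  | nil => intro P removed best run lastS _ _ x; simp
  | cons k q ih =>
    intro P removed best run lastS hsort hinv x
    have hsort' : ((P ++ [k]) ++ q).Pairwise (fun a b => sI occs a ≤ sI occs b) := by
      rwa [List.append_assoc, List.singleton_append]
    have hPk : ∀ j ∈ P, sI occs j ≤ sI occs k := by
      intro j hj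
      exact (List.pairwise_append.mp hsort).2.2 j hj k List.mem_cons_self
    have hkq : ∀ j ∈ q, sI occs k ≤ sI occs j :=
      (List.pairwise_cons.mp (List.pairwise_append.mp hsort).2.1).1
    obtain ⟨hnil, hlast⟩ := hinv
    -- name the post-step state components
    set best' : Option Int := upd1 best run lastS (sI occs k) with hbest'def
    set removed' : PySem.Set Int := updRem removed best' (sI occs k) k with hrem'def
    set run' : Option Int := updRun run (eI occs k) with hrun'def
    have hstep : pass1Step occs (removed, best, run, lastS) k
        = (removed', best', run', some (sI occs k)) := pass1Step_eq occs removed best run lastS k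
    -- characterization of best' (the max end over starts strictly below sI k)
    have hbestchar : ∀ c, (∃ m, best' = some m ∧ c < m) ↔
        ∃ j ∈ P, sI occs j < sI occs k ∧ c < eI occs j := by
      intro c
      by_cases hPe : P = []
      · obtain ⟨hb, _, hl⟩ := hnil hPe
        simp [hbest'def, upd1, hl, hb, hPe]
      · obtain ⟨lp, hlp⟩ := Option.isSome_iff_exists.mp (List.getLast?_isSome.mpr hPe)
        obtain ⟨hls, hble, hrunc, hbestc⟩ := hlast lp hlp
        have hlpP : lp ∈ P := List.mem_of_getLast? hlp
        have hlpk : sI occs lp ≤ sI occs k := hPk lp hlpP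
        rw [hbest'def, hls]
        simp only [upd1]
        split
        · rename_i hgt
          rw [hrunc]
          constructor
          · rintro ⟨j, hj, hc⟩
            exact ⟨j, hj, by have := hble j hj; omega, hc⟩
          · rintro ⟨j, hj, _, hc⟩
            exact ⟨j, hj, hc⟩
        · rename_i hngt
          have heq : sI occs k = sI occs lp := by omega
          rw [hbestc, heq]
    have hrem : x ∈ removed' ↔ x ∈ removed ∨
        (x = k ∧ ∃ j ∈ P, sI occs j < sI occs k ∧ sI occs k < eI occs j) := by
      rw [hrem'def]
      cases hb : best' with
      | none =>
        have : ¬ ∃ j ∈ P, sI occs j < sI occs k ∧ sI occs k < eI occs j := by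
          rw [← hbestchar (sI occs k)]
          rintro ⟨m, hm, _⟩
          rw [hb] at hm
          cases hm
        simp [updRem, this]
      | some b =>
        simp only [updRem]
        split
        · rename_i hgt
          have hex : ∃ j ∈ P, sI occs j < sI occs k ∧ sI occs k < eI occs j :=
            (hbestchar (sI occs k)).mp ⟨b, hb, hgt⟩
          rw [PySem.Set.mem_add]
          constructor
          · rintro (hx | rfl)
            · exact Or.inl hx
            · exact Or.inr ⟨rfl, hex⟩
          · rintro (hx | ⟨rfl, _⟩)
            · exact Or.inl hx
            · exact Or.inr rfl
        · rename_i hngt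
          have : ¬ ∃ j ∈ P, sI occs j < sI occs k ∧ sI occs k < eI occs j := by
            rw [← hbestchar (sI occs k)]
            rintro ⟨m, hm, hcm⟩
            rw [hb] at hm
            cases hm
            omega
          simp [this]
    have hinv' : Inv1 occs (P ++ [k]) best' run' (some (sI occs k)) := by
      constructor
      · intro h; simp at h
      · intro lp' hlp'
        have hl' : (P ++ [k]).getLast? = some k := by simp
        rw [hl'] at hlp'
        cases hlp'
        refine ⟨rfl, ?_, ?_, ?_⟩
        · intro j hj
          rcases List.mem_append.mp hj with hj | hj
          · exact hPk j hj
          · rw [List.mem_singleton.mp hj]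
        · intro c
          have hrunold : (∃ m, run = some m ∧ c < m) ↔ ∃ j ∈ P, c < eI occs j := by
            by_cases hPe : P = []
            · obtain ⟨_, hr, _⟩ := hnil hPe
              simp [hr, hPe]
            · obtain ⟨lp, hlp⟩ :=
                Option.isSome_iff_exists.mp (List.getLast?_isSome.mpr hPe)
              obtain ⟨_, _, hrunc, _⟩ := hlast lp hlp
              exact hrunc c
          constructor
          · rintro ⟨m, hm, hcm⟩
            rw [hrun'def] at hm
            cases hr : run with
            | none =>
              rw [hr] at hm; simp only [updRun] at hm; cases hm
              exact ⟨k, by simp, hcm⟩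
            | some r =>
              rw [hr] at hm; simp only [updRun] at hm; cases hm
              rcases lt_max_iff.mp hcm with h | h
              · obtain ⟨j, hj, hcj⟩ := hrunold.mp ⟨r, hr, h⟩
                exact ⟨j, List.mem_append_left _ hj, hcj⟩
              · exact ⟨k, by simp, h⟩
          · rintro ⟨j, hj, hcj⟩
            rcases List.mem_append.mp hj with hj | hj
            · obtain ⟨m, hm, hcm⟩ := hrunold.mpr ⟨j, hj, hcj⟩
              rw [hrun'def, hm]
              exact ⟨max m (eI occs k), rfl, lt_max_iff.mpr (Or.inl hcm)⟩
            · rw [List.mem_singleton.mp hj] at hcj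
              rw [hrun'def]
              cases hr : run with
              | none => exact ⟨eI occs k, rfl, hcj⟩
              | some r => exact ⟨max r (eI occs k), rfl, lt_max_iff.mpr (Or.inr hcj)⟩
        · intro c
          rw [hbestchar c]
          constructor
          · rintro ⟨j, hj, hs, hc⟩
            exact ⟨j, List.mem_append_left _ hj, hs, hc⟩
          · rintro ⟨j, hj, hs, hc⟩
            rcases List.mem_append.mp hj with hj | hj
            · exact ⟨j, hj, hs, hc⟩
            · rw [List.mem_singleton.mp hj] at hs
              omega
    rw [List.foldl_cons, hstep, ih (P ++ [k]) removed' best' run' (some (sI occs k))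
      hsort' hinv' x, hrem]
    have hCk : (∃ j ∈ P, sI occs j < sI occs k ∧ sI occs k < eI occs j) ↔
        (∃ j ∈ P ++ k :: q, sI occs j < sI occs k ∧ sI occs k < eI occs j) := by
      constructor
      · rintro ⟨j, hj, h⟩; exact ⟨j, List.mem_append_left _ hj, h⟩
      · rintro ⟨j, hj, hs, hc⟩
        rcases List.mem_append.mp hj with hj | hj
        · exact ⟨j, hj, hs, hc⟩
        · rcases List.mem_cons.mp hj with rfl | hj
          · omega
          · have := hkq j hj; omega
    have hassoc : (P ++ [k]) ++ q = P ++ k :: q := by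
      rw [List.append_assoc, List.singleton_append]
    rw [hassoc, hCk]
    simp only [List.mem_cons, exists_eq_or_imp]
    rw [or_assoc]

lemma pass2_go (occs : List (Int × Int)) : ∀ (q P : List Int)
    (removed : PySem.Set Int) (succ lastS : Option Int),
    (P ++ q).Pairwise (fun a b => sI occs b ≤ sI occs a) →
    Inv2 occs P succ lastS →
    ∀ x, x ∈ (q.foldl (pass2Step occs) (removed, succ, lastS)).1 ↔
      x ∈ removed ∨ ∃ k ∈ q, x = k ∧
        ∃ j ∈ P ++ q, sI occs k < sI occs j ∧ sI occs j < eI occs k := by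
  intro q
  induction q with
  | nil => intro P removed succ lastS _ _ x; simp
  | cons k q ih =>
    intro P removed succ lastS hsort hinv x
    have hsort' : ((P ++ [k]) ++ q).Pairwise (fun a b => sI occs b ≤ sI occs a) := by
      rwa [List.append_assoc, List.singleton_append]
    have hPk : ∀ j ∈ P, sI occs k ≤ sI occs j := by
      intro j hj
      exact (List.pairwise_append.mp hsort).2.2 j hj k List.mem_cons_self
    have hkq : ∀ j ∈ q, sI occs j ≤ sI occs k :=
      (List.pairwise_cons.mp (List.pairwise_append.mp hsort).2.1).1
    obtain ⟨hnil, hlast⟩ := hinv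
    set succ' : Option Int := upd2 succ lastS (sI occs k) with hsucc'def
    set removed' : PySem.Set Int := updRem2 removed succ' (eI occs k) k with hrem'def
    have hstep : pass2Step occs (removed, succ, lastS) k
        = (removed', succ', some (sI occs k)) := pass2Step_eq occs removed succ lastS k
    have hsuccchar : ∀ c, (∃ m, succ' = some m ∧ m < c) ↔
        ∃ j ∈ P, sI occs k < sI occs j ∧ sI occs j < c := by
      intro c
      by_cases hPe : P = []
      · obtain ⟨hsc, hl⟩ := hnil hPe
        simp [hsucc'def, upd2, hl, hsc, hPe]
      · obtain ⟨lp, hlp⟩ := Option.isSome_iff_exists.mp (List.getLast?_isSome.mpr hPe)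
        obtain ⟨hls, hge, hsuccc⟩ := hlast lp hlp
        have hlpP : lp ∈ P := List.mem_of_getLast? hlp
        have hlpk : sI occs k ≤ sI occs lp := hPk lp hlpP
        rw [hsucc'def, hls]
        simp only [upd2]
        split
        · rename_i hlt
          constructor
          · rintro ⟨m, hm, hmc⟩
            cases hm
            exact ⟨lp, hlpP, by omega, by omega⟩
          · rintro ⟨j, hj, _, hjc⟩
            exact ⟨sI occs lp, rfl, by have := hge j hj; omega⟩
        · rename_i hnlt
          have heq : sI occs k = sI occs lp := by omega
          rw [hsuccc, heq]
    have hrem : x ∈ removed' ↔ x ∈ removed ∨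
        (x = k ∧ ∃ j ∈ P, sI occs k < sI occs j ∧ sI occs j < eI occs k) := by
      rw [hrem'def]
      cases hb : succ' with
      | none =>
        have : ¬ ∃ j ∈ P, sI occs k < sI occs j ∧ sI occs j < eI occs k := by
          rw [← hsuccchar (eI occs k)]
          rintro ⟨m, hm, _⟩
          rw [hb] at hm
          cases hm
        simp [updRem2, this]
      | some sc =>
        simp only [updRem2]
        split
        · rename_i hlt
          have hex : ∃ j ∈ P, sI occs k < sI occs j ∧ sI occs j < eI occs k :=
            (hsuccchar (eI occs k)).mp ⟨sc, hb, hlt⟩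
          rw [PySem.Set.mem_add]
          constructor
          · rintro (hx | rfl)
            · exact Or.inl hx
            · exact Or.inr ⟨rfl, hex⟩
          · rintro (hx | ⟨rfl, _⟩)
            · exact Or.inl hx
            · exact Or.inr rfl
        · rename_i hnlt
          have : ¬ ∃ j ∈ P, sI occs k < sI occs j ∧ sI occs j < eI occs k := by
            rw [← hsuccchar (eI occs k)]
            rintro ⟨m, hm, hcm⟩
            rw [hb] at hm
            cases hm
            omega
          simp [this]
    have hinv' : Inv2 occs (P ++ [k]) succ' (some (sI occs k)) := by
      constructor
      · intro h; simp at h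
      · intro lp' hlp'
        have hl' : (P ++ [k]).getLast? = some k := by simp
        rw [hl'] at hlp'
        cases hlp'
        refine ⟨rfl, ?_, ?_⟩
        · intro j hj
          rcases List.mem_append.mp hj with hj | hj
          · exact hPk j hj
          · rw [List.mem_singleton.mp hj]
        · intro c
          rw [hsuccchar c]
          constructor
          · rintro ⟨j, hj, hs, hc⟩
            exact ⟨j, List.mem_append_left _ hj, hs, hc⟩
          · rintro ⟨j, hj, hs, hc⟩
            rcases List.mem_append.mp hj with hj | hj
            · exact ⟨j, hj, hs, hc⟩
            · rw [List.mem_singleton.mp hj] at hs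
              omega
    rw [List.foldl_cons, hstep, ih (P ++ [k]) removed' succ' (some (sI occs k))
      hsort' hinv' x, hrem]
    have hCk : (∃ j ∈ P, sI occs k < sI occs j ∧ sI occs j < eI occs k) ↔
        (∃ j ∈ P ++ k :: q, sI occs k < sI occs j ∧ sI occs j < eI occs k) := by
      constructor
      · rintro ⟨j, hj, h⟩; exact ⟨j, List.mem_append_left _ hj, h⟩
      · rintro ⟨j, hj, hs, hc⟩
        rcases List.mem_append.mp hj with hj | hj
        · exact ⟨j, hj, hs, hc⟩
        · rcases List.mem_cons.mp hj with rfl | hj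
          · omega
          · have := hkq j hj; omega
    have hassoc : (P ++ [k]) ++ q = P ++ k :: q := by
      rw [List.append_assoc, List.singleton_append]
    rw [hassoc, hCk]
    simp only [List.mem_cons, exists_eq_or_imp]
    rw [or_assoc]

lemma check_occs_alt_eq_G (occs : List (Int × Int)) : check_occs_alt occs = G occs := by
  simp only [check_occs_alt]
  set order : List Int := PySem.List.sorted (PySem.List.pyRange 0 (occs.length : Int) 1)
      (fun k => (PySem.List.pyGetD occs k (0, 0)).1) false with horderdef
  have hperm : order.Perm (PySem.List.pyRange 0 (occs.length : Int) 1) :=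
    PySem.List.sorted_perm _ _ _
  have hmemo : ∀ x : Int, x ∈ order ↔ 0 ≤ x ∧ x < (occs.length : Int) := by
    intro x
    rw [hperm.mem_iff, PySem.List.mem_pyRange_one]
  have hsorted : order.Pairwise (fun a b => sI occs a ≤ sI occs b) :=
    PySem.List.sorted_pairwise _ _
  set st1 := order.foldl (pass1Step occs) (PySem.Set.empty, none, none, none) with hst1
  set st2 := order.reverse.foldl (pass2Step occs) (st1.1, none, none) with hst2
  have hInvNil1 : Inv1 occs [] none none none :=
    ⟨fun _ => ⟨rfl, rfl, rfl⟩, fun lp h => absurd h (by simp)⟩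
  have hInvNil2 : Inv2 occs [] none none :=
    ⟨fun _ => ⟨rfl, rfl⟩, fun lp h => absurd h (by simp)⟩
  have h1 : ∀ x : Int, x ∈ st1.1 ↔
      ∃ k ∈ order, x = k ∧ ∃ j ∈ order, sI occs j < sI occs k ∧ sI occs k < eI occs j := by
    intro x
    rw [hst1, pass1_go occs order [] PySem.Set.empty none none none
      (by rw [List.nil_append]; exact hsorted) hInvNil1 x]
    simp [PySem.Set.empty]
  have h2 : ∀ x : Int, x ∈ st2.1 ↔ x ∈ st1.1 ∨
      ∃ k ∈ order, x = k ∧ ∃ j ∈ order, sI occs k < sI occs j ∧ sI occs j < eI occs k := by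
    intro x
    rw [hst2, pass2_go occs order.reverse [] st1.1 none none
      (by rw [List.nil_append, List.pairwise_reverse]; exact hsorted) hInvNil2 x]
    simp only [List.nil_append, List.mem_reverse]
  have hfin : ∀ x : Int, x ∈ st2.1 ↔
      (0 ≤ x ∧ x < (occs.length : Int)) ∧ badB occs x = true := by
    intro x
    rw [h2, h1]
    simp only [badB, List.any_eq_true]
    constructor
    · rintro (⟨k, hk, rfl, j, hj, hs, he⟩ | ⟨k, hk, rfl, j, hj, hs, he⟩)
      · refine ⟨(hmemo x).mp hk, j, ?_, ?_⟩
        · rw [← hperm.mem_iff]; exact hj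
        · simp only [condB, decide_eq_true_eq]
          right
          exact ⟨he, hs⟩
      · refine ⟨(hmemo x).mp hk, j, ?_, ?_⟩
        · rw [← hperm.mem_iff]; exact hj
        · simp only [condB, decide_eq_true_eq]
          left
          exact ⟨he, hs⟩
    · rintro ⟨hx, j, hj, hc⟩
      rw [← hperm.mem_iff] at hj
      simp only [condB, decide_eq_true_eq] at hc
      rcases hc with ⟨he, hs⟩ | ⟨he, hs⟩
      · exact Or.inr ⟨x, (hmemo x).mpr hx, rfl, j, hj, hs, he⟩
      · exact Or.inl ⟨x, (hmemo x).mpr hx, rfl, j, hj, hs, he⟩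
  rw [PySem.List.enumerate_eq_map_pyRange occs (0, 0)]
  simp only [PySem.List.len_eq]
  rw [List.filter_map, List.map_map]
  unfold G
  have hfc : (PySem.List.pyRange 0 (occs.length : Int) 1).filter
        ((fun p : Int × (Int × Int) => !PySem.Set.contains st2.1 p.1) ∘
          (fun j => (j, PySem.List.pyGetD occs j (0, 0))))
      = (PySem.List.pyRange 0 (occs.length : Int) 1).filter (fun k => !badB occs k) := by
    apply List.filter_congr
    intro j hj
    rw [PySem.List.mem_pyRange_one] at hj
    simp only [Function.comp_apply]
    congr 1
    rw [Bool.eq_iff_iff, PySem.Set.contains_iff, hfin]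
    constructor
    · rintro ⟨_, hb⟩; exact hb
    · intro hb; exact ⟨hj, hb⟩
  rw [hfc]
  apply List.map_congr_left
  intro k _
  simp

-- ===== VERDICT (by name: the statement is the Claim_ definition above) =====
theorem check_occs_spec : Claim_equal_check_occs := by
  intro occs _
  unfold Spec_check_occs
  rw [check_occs_eq_G, check_occs_alt_eq_G]
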